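-- pv_equiv track=rewrite | github.com/DCOR-dev/DCOR-Aid | dcoraid/upload/job.py | valid_resource_name
-- ===== SOURCE A (Python) =====
-- VALID_RESOURCE_CHARS = "abcdefghijklmnopqrstuvwxyz" \
--                        + "ABCDEFGHIJKLMNOPQRSTUVWXYZ" \
--                        + "0123456789" \
--                        + ".,-_+()[]"
--
-- def valid_resource_name(path_name):
--     """Return a valid DCOR resource name, by replacing characters"""
--     # make resource suffix lower-case
--     if not path_name.count("."):
--         raise ValueError(
--             f"Resource names must have a suffix, got '{path_name}'")
--     stem, suffix = path_name.rsplit(".", 1)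
--     path_name = f"{stem}.{suffix.lower()}"
--
--     # convert spaces to underscores
--     path_name = path_name.replace(" ", "_")
--
--     # convert all other characters to dots
--     new_name = ""
--     for char in path_name:
--         if char in VALID_RESOURCE_CHARS:
--             new_name += char
--         else:
--             new_name += "."
--     path_name = new_name
--
--     return path_name
-- ===== SOURCE B (Python) =====
-- VALID_RESOURCE_CHARS = "abcdefghijklmnopqrstuvwxyz" \
--                        + "ABCDEFGHIJKLMNOPQRSTUVWXYZ" \
--                        + "0123456789" \
--                        + ".,-_+()[]"
--
--
-- def valid_resource_name(path_name):
--     """Return a valid DCOR resource name, by replacing characters.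
--
--     Single backward pass: walk the string right-to-left with a state flag;
--     while still inside the suffix (before the last dot is met) characters are
--     lower-cased, and every character is sanitized on the fly (space ->
--     underscore, invalid -> dot).  No splitting, no intermediate strings.
--     """
--     if "." not in path_name:
--         raise ValueError(
--             f"Resource names must have a suffix, got '{path_name}'")
--     out = []
--     in_suffix = True
--     for char in reversed(path_name):
--         if in_suffix:
--             if char == ".":
--                 in_suffix = False
--             else:
--                 char = char.lower()
--         if char == " ":
--             char = "_"
--         elif char not in VALID_RESOURCE_CHARS:
--             char = "."
--         out.append(char)
--     return "".join(reversed(out))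
-- ===== Notes on version B (the rewrite author's own statement) =====
-- stated objective: alternative
-- what changed: A's staged pipeline (rsplit at the last dot, lowercase the suffix, re-join, replace spaces, then a char-accumulation loop) is replaced by one backward scan with an in_suffix state flag that lowercases and sanitizes each character on the fly, building no intermediate strings.
import Mathlib
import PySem

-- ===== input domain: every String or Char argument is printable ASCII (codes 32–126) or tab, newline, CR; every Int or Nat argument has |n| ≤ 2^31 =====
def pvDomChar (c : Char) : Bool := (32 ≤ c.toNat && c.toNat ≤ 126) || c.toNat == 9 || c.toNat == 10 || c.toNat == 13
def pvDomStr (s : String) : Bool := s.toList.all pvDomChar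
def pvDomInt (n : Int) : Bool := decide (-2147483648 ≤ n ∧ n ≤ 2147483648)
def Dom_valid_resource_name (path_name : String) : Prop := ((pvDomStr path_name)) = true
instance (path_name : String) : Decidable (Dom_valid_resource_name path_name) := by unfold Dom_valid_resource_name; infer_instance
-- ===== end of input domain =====

-- B replaces A's staged pipeline (rsplit, lowercase suffix, re-join, replace spaces, char
-- accumulation loop) by ONE backward scan with an in_suffix state flag; same return values.

def pvValidChars : List Char :=
  "abcdefghijklmnopqrstuvwxyzABCDEFGHIJKLMNOPQRSTUVWXYZ0123456789.,-_+()[]".toList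

-- ===== PORT A =====
def valid_resource_name (path_name : String) : String :=
  if PySem.Str.count path_name "." = 0 then ""   -- Python raises ValueError here (excluded by Pre_)
  else
    let cs := path_name.toList
    -- hand port of path_name.rsplit(".", 1): split at the LAST '.'; exact since '.' occurs here
    let rev := cs.reverse
    let suffix := (rev.takeWhile (fun c => c ≠ '.')).reverse
    let stem := ((rev.dropWhile (fun c => c ≠ '.')).drop 1).reverse
    let cs1 := stem ++ ['.'] ++ PySem.Chars.lower suffix
    -- path_name.replace(" ", "_")
    let cs2 := PySem.Chars.replace cs1 [' '] ['_']
    -- the accumulation loop: new_name += char / new_name += "."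
    let newName := cs2.foldl
      (fun acc c => if PySem.Chars.isIn [c] pvValidChars then acc ++ [c] else acc ++ ['.']) []
    String.mk newName

-- ===== PORT B =====
-- one step of B's backward scan: maybe leave the suffix state, lowercase inside the suffix,
-- then sanitize (space → '_', invalid → '.') and append to out
def pvStep (st : Bool × List Char) (c : Char) : Bool × List Char :=
  let (inSuffix, c) :=
    if st.1 then
      (if c = '.' then (false, c) else (true, PySem.Chars.lowerChar c))
    else (false, c)
  let c := if c = ' ' then '_'
           else if PySem.Chars.isIn [c] pvValidChars then c else '.'
  (inSuffix, st.2 ++ [c])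

def valid_resource_name_alt (path_name : String) : String :=
  if PySem.Str.isIn "." path_name then
    let out := path_name.toList.reverse.foldl pvStep (true, [])
    String.mk out.2.reverse
  else ""   -- Python raises ValueError here (excluded by Pre_)

-- ===== PRECONDITION & SPEC =====
-- Pre_ excludes exactly the inputs containing no dot character, on which Python A raises ValueError
def Pre_valid_resource_name (path_name : String) : Prop :=
  PySem.Str.count path_name "." ≠ 0
instance (path_name : String) : Decidable (Pre_valid_resource_name path_name) := by
  unfold Pre_valid_resource_name; infer_instance

def pvWitness_valid_resource_name : String := "a file.TXT"

def Spec_valid_resource_name (path_name : String) (out : String) : Prop := out = valid_resource_name_alt path_name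
instance (path_name : String) (out : String) : Decidable (Spec_valid_resource_name path_name out) := by unfold Spec_valid_resource_name; infer_instance

-- ===== CLAIM (what is proved, stated in full; the proofs are below) =====
def Claim_equal_valid_resource_name : Prop := ∀ (path_name : String), Dom_valid_resource_name path_name → Pre_valid_resource_name path_name → Spec_valid_resource_name path_name (valid_resource_name path_name)

-- ===== LEMMAS AND PROOFS =====

-- B's sanitizing substitution, as a function on one character
def pvTr (c : Char) : Char :=
  if c = ' ' then '_' else if PySem.Chars.isIn [c] pvValidChars then c else '.'

-- a nonzero count of "." means '.' occurs in the string
theorem pv_count_go_eq_of_not_mem (c : Char) (fuel : Nat) (l : List Char) (acc : Nat)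
    (hf : l.length ≤ fuel) (h : c ∉ l) :
    PySem.Chars.count.go [c] fuel l acc = acc := by
  induction fuel generalizing l acc with
  | zero => cases l with
    | nil => rfl
    | cons x t => simp at hf
  | succ n ih =>
    cases l with
    | nil => rfl
    | cons x t =>
      have hxc : ¬ [c].isPrefixOf (x :: t) := by
        simp [List.isPrefixOf]
        intro hx; exact h (by simp [hx])
      simp only [PySem.Chars.count.go, if_neg hxc]
      exact ih t acc (by simpa using Nat.le_of_succ_le_succ hf) (fun hm => h (by simp [hm]))

theorem pv_mem_of_count_ne (cs : List Char) (c : Char)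
    (h : PySem.Chars.count cs [c] ≠ 0) : c ∈ cs := by
  by_contra hm
  exact h (pv_count_go_eq_of_not_mem c cs.length cs 0 le_rfl hm)

-- A's replace(" ", "_") on single-char pattern is a pointwise map
theorem pv_replace_go_single (a b : Char) (fuel : Nat) (l acc : List Char)
    (hf : l.length ≤ fuel) :
    PySem.Chars.replace.go [a] [b] fuel l acc
      = acc.reverse ++ l.map (fun c => if c = a then b else c) := by
  induction fuel generalizing l acc with
  | zero => cases l with
    | nil => simp [PySem.Chars.replace.go]
    | cons x t => simp at hf
  | succ n ih =>
    cases l with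
    | nil => simp [PySem.Chars.replace.go]
    | cons x t =>
      have ht : t.length ≤ n := by simpa using Nat.le_of_succ_le_succ hf
      by_cases hx : x = a
      · have hp : [a].isPrefixOf (x :: t) = true := by simp [List.isPrefixOf, hx]
        simp [PySem.Chars.replace.go, hx, ih t (b :: acc) ht]
      · have hp : ¬ [a].isPrefixOf (x :: t) = true := by
          simp [List.isPrefixOf]; exact fun h => hx h.symm
        simp [PySem.Chars.replace.go, hp, hx, ih t (x :: acc) ht]

theorem pv_replace_single (a b : Char) (l : List Char) :
    PySem.Chars.replace l [a] [b] = l.map (fun c => if c = a then b else c) := by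
  simpa [PySem.Chars.replace] using pv_replace_go_single a b l.length l [] le_rfl

-- A's accumulation loop is a pointwise character map
theorem pv_foldl_dot (p : Char → Bool) (l a : List Char) :
    l.foldl (fun acc c => if p c then acc ++ [c] else acc ++ ['.']) a
      = a ++ l.map (fun c => if p c then c else '.') := by
  induction l generalizing a with
  | nil => simp
  | cons c l ih =>
    simp only [List.foldl_cons, List.map_cons, ih]
    split <;> simp

-- B's scan while inside the suffix (no '.' seen yet): lowercase + sanitize, state stays true
theorem pv_fold_step_true (l : List Char) (a : List Char) (h : '.' ∉ l) :
    l.foldl pvStep (true, a)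
      = (true, a ++ l.map (fun c => pvTr (PySem.Chars.lowerChar c))) := by
  induction l generalizing a with
  | nil => simp
  | cons c t ih =>
    have hc : c ≠ '.' := fun hc => h (by simp [hc])
    simp only [List.foldl_cons, List.map_cons]
    rw [show pvStep (true, a) c = (true, a ++ [pvTr (PySem.Chars.lowerChar c)]) from by
      simp [pvStep, pvTr, hc]]
    rw [ih (a ++ [pvTr (PySem.Chars.lowerChar c)]) (fun hm => h (by simp [hm]))]
    simp

-- B's scan after the dot: sanitize only, state stays false
theorem pv_fold_step_false (l : List Char) (a : List Char) :
    l.foldl pvStep (false, a) = (false, a ++ l.map pvTr) := by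
  induction l generalizing a with
  | nil => simp
  | cons c t ih =>
    simp only [List.foldl_cons, List.map_cons]
    rw [show pvStep (false, a) c = (false, a ++ [pvTr c]) from by simp [pvStep, pvTr]]
    rw [ih]; simp

-- 'char in VALID_RESOURCE_CHARS' (substring test on a one-char string) is list membership
theorem pv_isIn_singleton (c : Char) (l : List Char) :
    PySem.Chars.isIn [c] l = l.contains c := by
  rcases h : l.contains c with _ | _
  · rw [PySem.Chars.isIn_eq_false_iff]
    intro hinf
    have hm : c ∈ l := hinf.mem (List.mem_singleton_self c)
    rw [← List.contains_iff_mem, h] at hm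
    exact Bool.false_ne_true hm
  · rw [PySem.Chars.isIn_iff_infix]
    have hc : c ∈ l := List.contains_iff_mem.mp h
    obtain ⟨s, t, rfl⟩ := List.append_of_mem hc
    exact ⟨s, t, by simp⟩

-- A's composition replace-then-sanitize equals B's one-character substitution pvTr
theorem pv_tr_eq (c : Char) :
    (fun c => if PySem.Chars.isIn [c] pvValidChars then c else '.')
      ((fun c => if c = ' ' then '_' else c) c) = pvTr c := by
  by_cases hc : c = ' '
  · simp [pvTr, hc, pv_isIn_singleton]
    decide
  · simp [pvTr, hc]

-- '.' is a valid resource character, so both ports keep the separating dot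
theorem pv_tr_dot : pvTr '.' = '.' := by decide

-- B's step at the last dot: leave the suffix state and emit the dot
theorem pv_step_dot (a : List Char) : pvStep (true, a) '.' = (false, a ++ ['.']) := by
  have h : PySem.Chars.isIn ['.'] pvValidChars = true := by decide
  simp [pvStep, h]

-- core list-level equality: A's staged passes equal B's backward scan, for any cs containing '.'
theorem pv_core (cs : List Char) (hmem : '.' ∈ cs) :
    (PySem.Chars.replace
        ((((cs.reverse.dropWhile (fun c => c ≠ '.')).drop 1).reverse) ++ ['.'] ++
          PySem.Chars.lower ((cs.reverse.takeWhile (fun c => c ≠ '.')).reverse)) [' ']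
        ['_']).foldl
      (fun acc c => if PySem.Chars.isIn [c] pvValidChars then acc ++ [c] else acc ++ ['.']) []
    = (cs.reverse.foldl pvStep (true, [])).2.reverse := by
  have hrev : '.' ∈ cs.reverse := by simpa using hmem
  have hne : cs.reverse.dropWhile (fun c => (c ≠ '.' : Bool)) ≠ [] := by
    intro h
    rw [List.dropWhile_eq_nil_iff] at h
    simpa using h '.' hrev
  obtain ⟨r, rt, hrest⟩ := List.exists_cons_of_ne_nil hne
  have hr : r = '.' := by
    have hh := List.head_dropWhile_not (fun c => (c ≠ '.' : Bool)) hne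
    simp only [hrest, List.head_cons] at hh
    simpa using hh
  subst hr
  have hS : '.' ∉ cs.reverse.takeWhile (fun c => (c ≠ '.' : Bool)) := by
    intro hx
    simpa using List.mem_takeWhile_imp hx
  have hdecomp : cs.reverse
      = cs.reverse.takeWhile (fun c => (c ≠ '.' : Bool)) ++ '.' :: rt := by
    conv_lhs => rw [← List.takeWhile_append_dropWhile
      (p := fun c => (c ≠ '.' : Bool)) (l := cs.reverse), hrest]
  -- A side: replace and the loop are pointwise maps
  rw [pv_replace_single, pv_foldl_dot, hrest]
  -- B side: split the scan at the dot
  conv_rhs => rw [hdecomp]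
  rw [List.foldl_append, pv_fold_step_true _ _ hS, List.foldl_cons, pv_step_dot,
    pv_fold_step_false]
  simp only [PySem.Chars.lower, List.drop_succ_cons, List.drop_zero, List.map_append,
    List.map_map, List.map_reverse, List.reverse_append, List.reverse_cons,
    List.nil_append, List.map_cons, List.append_assoc]
  have hfun : ∀ l : List Char,
      l.map ((fun c => if PySem.Chars.isIn [c] pvValidChars then c else '.') ∘
          fun c => if c = ' ' then '_' else c) = l.map pvTr := by
    intro l
    exact List.map_congr_left fun c _ => pv_tr_eq c
  rw [hfun, hfun]
  simp only [pv_tr_eq '.']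
  have hmap :
      List.map
          ((fun c => if PySem.Chars.isIn [c] pvValidChars = true then c else '.') ∘
            (fun c => if c = ' ' then '_' else c) ∘ PySem.Chars.lowerChar)
          (List.takeWhile (fun c => decide (c ≠ '.')) cs.reverse)
        = List.map (fun c => pvTr (PySem.Chars.lowerChar c))
            (List.takeWhile (fun c => decide (c ≠ '.')) cs.reverse) :=
    List.map_congr_left fun a _ => pv_tr_eq (PySem.Chars.lowerChar a)
  rw [hmap]
  simp [pv_tr_dot]

-- ===== VERDICT (by name: the statement is the Claim_ definition above) =====
theorem valid_resource_name_spec : Claim_equal_valid_resource_name := by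
  intro path_name _ hpre
  unfold Spec_valid_resource_name valid_resource_name valid_resource_name_alt
  have hmem : '.' ∈ path_name.toList := by
    apply pv_mem_of_count_ne
    simpa using hpre
  have hguardB : PySem.Str.isIn "." path_name = true := by
    rw [PySem.Str.isIn_iff_infix]
    obtain ⟨s, t, hst⟩ := List.append_of_mem hmem
    exact ⟨s, t, by simpa using hst.symm⟩
  rw [if_neg hpre, if_pos hguardB]
  exact congrArg String.mk (pv_core path_name.toList hmem)
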